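-- pv_equiv track=rewrite | github.com/Akshat7274/CipherLock | Application/Ciphers/Hill.py | key_generate
-- ===== SOURCE A (Python) =====
-- def key_generate(ky,sz):
--     mat = []
--     mul = []
--     temp = []
--     temp_mul = []
--     for i in ky:
--         temp.append(i)
--         temp_mul.append(ord(i)-97)
--         if (len(temp)==sz):
--             mat.append(temp)
--             mul.append(temp_mul)
--             temp = []
--             temp_mul = []
--     return mat,mul
-- ===== SOURCE B (Python) =====
-- def key_generate(ky, sz):
--     # Chunk-wise: peel off full slices of size sz; trailing partial chunk is dropped.
--     if sz <= 0:
--         return [], []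
--     mat = []
--     mul = []
--     rest = ky
--     while len(rest) >= sz:
--         chunk, rest = rest[:sz], rest[sz:]
--         mat.append(list(chunk))
--         mul.append([ord(c) - 97 for c in chunk])
--     return mat, mul
-- ===== Notes on version B (the rewrite author's own statement) =====
-- stated objective: simpler
-- what changed: Replaces the per-character accumulator-and-flush with direct slicing of full sz-sized chunks from the remaining string (guarding sz<=0, where A's flush never fires).
import Mathlib
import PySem

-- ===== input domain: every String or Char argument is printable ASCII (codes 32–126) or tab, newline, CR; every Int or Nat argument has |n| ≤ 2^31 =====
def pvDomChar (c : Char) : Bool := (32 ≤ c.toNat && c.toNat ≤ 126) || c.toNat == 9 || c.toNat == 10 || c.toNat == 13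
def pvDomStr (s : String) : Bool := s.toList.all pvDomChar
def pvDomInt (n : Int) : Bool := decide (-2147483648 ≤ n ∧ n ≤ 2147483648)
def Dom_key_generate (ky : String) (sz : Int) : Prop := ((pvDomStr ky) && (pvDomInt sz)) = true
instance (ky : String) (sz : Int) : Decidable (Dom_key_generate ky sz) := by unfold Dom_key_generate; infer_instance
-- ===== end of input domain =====

-- B replaces A's per-character accumulator-and-flush with direct slicing of full
-- sz-sized chunks off the remaining string (simpler decomposition; same O(n) cost).


-- ===== PORT A =====
-- state: (mat, mul, temp, temp_mul); iterating over a Python string yields 1-char strings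
def stepA (sz : Int) (s : List (List String) × List (List Int) × List String × List Int)
    (c : Char) : List (List String) × List (List Int) × List String × List Int :=
  match s with
  | (mat, mul, temp, tmul) =>
    let temp := temp ++ [c.toString]
    let tmul := tmul ++ [(c.toNat : Int) - 97]
    if (temp.length : Int) = sz then (mat ++ [temp], mul ++ [tmul], [], [])
    else (mat, mul, temp, tmul)

def key_generate (ky : String) (sz : Int) : List (List String) × List (List Int) :=
  let st := ky.toList.foldl (stepA sz) ([], [], [], [])
  (st.1, st.2.1)

-- ===== PORT B =====
-- while len(rest) >= sz: chunk, rest = rest[:sz], rest[sz:]  — for sz ≥ 1 these slices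
-- are exactly take/drop; the 0 < sz conjunct in the guard is B's outer 'sz <= 0' guard,
-- which also makes the recursion terminate.
def altGo (sz : Nat) (cs : List Char) : List (List String) × List (List Int) :=
  if h : 0 < sz ∧ sz ≤ cs.length then
    let chunk := cs.take sz
    let rest := altGo sz (cs.drop sz)
    (chunk.map (fun c => c.toString) :: rest.1,
     chunk.map (fun c => (c.toNat : Int) - 97) :: rest.2)
  else ([], [])
  termination_by cs.length
  decreasing_by simp; omega

def key_generate_alt (ky : String) (sz : Int) : List (List String) × List (List Int) :=
  if sz ≤ 0 then ([], []) else altGo sz.toNat ky.toList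

-- ===== PRECONDITION & SPEC =====
def Spec_key_generate (ky : String) (sz : Int) (out : List (List String) × List (List Int)) : Prop := out = key_generate_alt ky sz
instance (ky : String) (sz : Int) (out : List (List String) × List (List Int)) : Decidable (Spec_key_generate ky sz out) := by unfold Spec_key_generate; infer_instance

-- ===== CLAIM (what is proved, stated in full; the proofs are below) =====
def Claim_equal_key_generate : Prop := ∀ (ky : String) (sz : Int), Dom_key_generate ky sz → Spec_key_generate ky sz (key_generate ky sz)

-- ===== LEMMAS AND PROOFS =====

-- sz ≤ 0: A's flush condition len(temp) == sz never fires, so mat/mul stay unchanged.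
lemma foldA_nonpos (sz : Int) (hsz : sz ≤ 0) :
    ∀ (cs : List Char) (mat : List (List String)) (mul : List (List Int))
      (t : List String) (tm : List Int),
      (cs.foldl (stepA sz) (mat, mul, t, tm)).1 = mat ∧
      (cs.foldl (stepA sz) (mat, mul, t, tm)).2.1 = mul := by
  intro cs
  induction cs with
  | nil => intro mat mul t tm; exact ⟨rfl, rfl⟩
  | cons c cs ih =>
    intro mat mul t tm
    have hstep : stepA sz (mat, mul, t, tm) c
        = (mat, mul, t ++ [c.toString], tm ++ [(c.toNat : Int) - 97]) := by
      simp only [stepA]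
      rw [if_neg (by simp; omega : ¬ (((t ++ [c.toString]).length : Int) = sz))]
    rw [List.foldl_cons, hstep]
    exact ih mat mul _ _

-- unfold altGo at a list that starts with a full chunk
lemma altGo_chunk (sz : Nat) (hsz : 0 < sz) (t cs : List Char) (ht : t.length = sz) :
    altGo sz (t ++ cs) =
      (t.map (fun c => c.toString) :: (altGo sz cs).1,
       t.map (fun c => (c.toNat : Int) - 97) :: (altGo sz cs).2) := by
  rw [altGo]
  have hc : 0 < sz ∧ sz ≤ (t ++ cs).length := by simp [ht]; omega
  simp [hc, ht]

lemma altGo_short (sz : Nat) (t : List Char) (ht : t.length < sz) :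
    altGo sz t = ([], []) := by
  rw [altGo]
  have : ¬ (0 < sz ∧ sz ≤ t.length) := by omega
  simp [this]

-- main invariant: running A's loop from a partial chunk t (|t| < sz) appends exactly
-- the chunks of t ++ cs to mat/mul.
lemma foldA_inv (sz : Int) (hsz : 0 < sz) :
    ∀ (cs t : List Char) (mat : List (List String)) (mul : List (List Int)),
      t.length < sz.toNat →
      (cs.foldl (stepA sz) (mat, mul, t.map (fun c => c.toString),
          t.map (fun c => (c.toNat : Int) - 97))).1 = mat ++ (altGo sz.toNat (t ++ cs)).1 ∧
      (cs.foldl (stepA sz) (mat, mul, t.map (fun c => c.toString),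
          t.map (fun c => (c.toNat : Int) - 97))).2.1 = mul ++ (altGo sz.toNat (t ++ cs)).2 := by
  intro cs
  induction cs with
  | nil =>
    intro t mat mul ht
    simp [altGo_short sz.toNat t ht]
  | cons c cs ih =>
    intro t mat mul ht
    have hmap1 : t.map (fun c => c.toString) ++ [c.toString]
        = (t ++ [c]).map (fun c => c.toString) := by simp
    have hmap2 : t.map (fun c => (c.toNat : Int) - 97) ++ [(c.toNat : Int) - 97]
        = (t ++ [c]).map (fun c => (c.toNat : Int) - 97) := by simp
    by_cases hfull : ((t ++ [c]).length : Int) = sz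
    · have hlen : (t ++ [c]).length = sz.toNat := by simp at hfull ⊢; omega
      have hstep : stepA sz (mat, mul, t.map (fun c => c.toString),
          t.map (fun c => (c.toNat : Int) - 97)) c
          = (mat ++ [(t ++ [c]).map (fun c => c.toString)],
             mul ++ [(t ++ [c]).map (fun c => (c.toNat : Int) - 97)], [], []) := by
        have hcond : (((t ++ [c]).map (fun c => c.toString)).length : Int) = sz := by
          simpa using hfull
        simp only [stepA, hmap1, hmap2]
        rw [if_pos hcond]
      have := ih [] (mat ++ [(t ++ [c]).map (fun c => c.toString)])
        (mul ++ [(t ++ [c]).map (fun c => (c.toNat : Int) - 97)]) (by simp; omega)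
      simp only [List.map_nil, List.nil_append] at this
      have hchunk := altGo_chunk sz.toNat (by omega) (t ++ [c]) cs hlen
      have hassoc : t ++ c :: cs = (t ++ [c]) ++ cs := by simp
      rw [List.foldl_cons, hstep, hassoc, hchunk]
      simpa using this
    · have hlt : (t ++ [c]).length < sz.toNat := by
        simp at hfull ⊢; omega
      have hstep : stepA sz (mat, mul, t.map (fun c => c.toString),
          t.map (fun c => (c.toNat : Int) - 97)) c
          = (mat, mul, (t ++ [c]).map (fun c => c.toString),
             (t ++ [c]).map (fun c => (c.toNat : Int) - 97)) := by
        have hcond : ¬ ((((t ++ [c]).map (fun c => c.toString)).length : Int) = sz) := by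
          simpa using hfull
        simp only [stepA, hmap1, hmap2]
        rw [if_neg hcond]
      have := ih (t ++ [c]) mat mul hlt
      rw [List.foldl_cons, hstep]
      simpa using this

-- ===== VERDICT (by name: the statement is the Claim_ definition above) =====
theorem key_generate_spec : Claim_equal_key_generate := by
  intro ky sz _
  unfold Spec_key_generate key_generate key_generate_alt
  by_cases hsz : sz ≤ 0
  · obtain ⟨h1, h2⟩ := foldA_nonpos sz hsz ky.toList [] [] [] []
    simp [hsz, h1, h2]
  · have hpos : 0 < sz := by omega
    obtain ⟨h1, h2⟩ := foldA_inv sz hpos ky.toList [] [] [] (by simp; omega)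
    simp only [List.map_nil, List.nil_append] at h1 h2
    simp [hsz, h1, h2]
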